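-- pv_equiv track=rewrite | github.com/adampolak/first-fit | runs/results/gen_202/main.py | _coverage_cells
-- ===== SOURCE A (Python) =====
-- def _coverage_cells(intervals):
--     """
--     Return coverage cells (x_i, x_{i+1}, m_i) where coverage is constant.
--     """
--     if not intervals:
--         return []
--     events = []
--     for (l, r) in intervals:
--         if l < r:
--             events.append((l, +1))
--             events.append((r, -1))
--     events.sort(key=lambda e: (e[0], 0 if e[1] == -1 else 1))
--     xs = sorted({x for x, _ in events})
--     ev_idx = 0
--     cur = 0
--     cells = []
--     for i in range(len(xs) - 1):
--         x = xs[i]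
--         y = xs[i + 1]
--         while ev_idx < len(events) and events[ev_idx][0] == x:
--             cur += events[ev_idx][1]
--             ev_idx += 1
--         if x < y:
--             cells.append((x, y, cur))
--     return cells
-- ===== SOURCE B (Python) =====
-- def _coverage_cells(intervals):
--     """
--     Return coverage cells (x_i, x_{i+1}, m_i) where coverage is constant.
--     No sweep: collect the distinct endpoints of the proper intervals, and for
--     each adjacent pair count directly how many intervals cover its left end.
--     """
--     pts = sorted({e for (l, r) in intervals if l < r for e in (l, r)})
--     return [(x, y, sum(1 for (l, r) in intervals if l <= x < r))
--             for x, y in zip(pts, pts[1:])]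
-- ===== Notes on version B (the rewrite author's own statement) =====
-- stated objective: simpler
-- what changed: Replaced the sweep line (sorted event list with tie-break key, event cursor and running counter) by direct per-cell counting: for each adjacent pair of distinct endpoints, count the intervals containing its left end; correct because coverage on a cell equals the number of intervals covering any point of it.
import Mathlib
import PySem

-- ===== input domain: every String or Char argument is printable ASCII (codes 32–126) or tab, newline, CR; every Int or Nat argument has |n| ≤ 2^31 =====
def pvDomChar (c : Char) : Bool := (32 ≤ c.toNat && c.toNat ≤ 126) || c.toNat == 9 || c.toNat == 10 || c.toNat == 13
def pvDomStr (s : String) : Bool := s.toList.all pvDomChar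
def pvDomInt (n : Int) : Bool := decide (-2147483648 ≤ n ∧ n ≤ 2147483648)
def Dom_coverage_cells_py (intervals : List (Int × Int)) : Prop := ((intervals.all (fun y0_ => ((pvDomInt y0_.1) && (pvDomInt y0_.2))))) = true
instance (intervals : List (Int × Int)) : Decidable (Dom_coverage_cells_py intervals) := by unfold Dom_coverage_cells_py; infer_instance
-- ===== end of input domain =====

-- B drops A's sweep line (sorted event list, cursor, running counter) and instead
-- counts, for each cell, the intervals containing its left endpoint: simpler.

-- ===== PORT A =====
-- events = []; for (l, r) in intervals: if l < r: events += [(l, +1), (r, -1)]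
def pvEventsOf (intervals : List (Int × Int)) : List (Int × Int) :=
  intervals.foldl (fun acc p => if p.1 < p.2 then acc ++ [(p.1, 1), (p.2, -1)] else acc) []

-- the inner 'while ev_idx < len(events) and events[ev_idx][0] == x: cur += …; ev_idx += 1'
-- (advancing ev_idx = dropping the consumed prefix)
def pvConsume (x : Int) : List (Int × Int) → Int → Int × List (Int × Int)
  | [], cur => (cur, [])
  | (c, d) :: rest, cur => if c = x then pvConsume x rest (cur + d) else (cur, (c, d) :: rest)

-- 'for i in range(len(xs) - 1): …'
def pvLoopA : List Int → List (Int × Int) → Int → List (Int × Int × Int)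
  | x :: y :: rest, evs, cur =>
      let p := pvConsume x evs cur
      (if x < y then [(x, y, p.1)] else []) ++ pvLoopA (y :: rest) p.2 p.1
  | _, _, _ => []

def coverage_cells_py (intervals : List (Int × Int)) : List (Int × Int × Int) :=
  if intervals = [] then []
  else
    let events := pvEventsOf intervals
    let sortedEvents :=
      PySem.List.sorted2 events (fun e => e.1) (fun e => if e.2 = -1 then (0 : Int) else 1)
    let xs := PySem.List.sorted (PySem.Set.ofList (events.map Prod.fst)) (fun x => x)
    pvLoopA xs sortedEvents 0

-- ===== PORT B =====
-- pts = sorted({e for (l, r) in intervals if l < r for e in (l, r)})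
-- [(x, y, sum(1 for (l, r) in intervals if l <= x < r)) for x, y in zip(pts, pts[1:])]
-- (the 0/1-sum is List.countP cast to Int; pts[1:] is PySem.List.slice pts 1 none)
def coverage_cells_py_alt (intervals : List (Int × Int)) : List (Int × Int × Int) :=
  let pts := PySem.List.sorted
    (PySem.Set.ofList ((intervals.filter (fun p => p.1 < p.2)).flatMap (fun p => [p.1, p.2])))
    (fun x => x)
  (pts.zip (PySem.List.slice pts (some 1) none)).map
    (fun q => (q.1, q.2,
      (intervals.countP (fun p => decide (p.1 ≤ q.1) && decide (q.1 < p.2)) : Int)))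

-- ===== PRECONDITION & SPEC =====
def Spec_coverage_cells_py (intervals : List (Int × Int)) (out : List (Int × Int × Int)) : Prop := out = coverage_cells_py_alt intervals
instance (intervals : List (Int × Int)) (out : List (Int × Int × Int)) : Decidable (Spec_coverage_cells_py intervals out) := by unfold Spec_coverage_cells_py; infer_instance

-- ===== CLAIM (what is proved, stated in full; the proofs are below) =====
def Claim_equal_coverage_cells_py : Prop := ∀ (intervals : List (Int × Int)), Dom_coverage_cells_py intervals → Spec_coverage_cells_py intervals (coverage_cells_py intervals)

-- ===== LEMMAS AND PROOFS =====

-- net delta at coordinate x / at coordinates ≤ x in an event list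
def pvSumAt (x : Int) (evs : List (Int × Int)) : Int :=
  ((evs.filter (fun e => e.1 = x)).map (fun e => e.2)).sum
def pvSumAtLE (x : Int) (evs : List (Int × Int)) : Int :=
  ((evs.filter (fun e => e.1 ≤ x)).map (fun e => e.2)).sum

-- B's per-cell count
def pvCov (intervals : List (Int × Int)) (x : Int) : Int :=
  (intervals.countP (fun p => decide (p.1 ≤ x) && decide (x < p.2)) : Int)

-- flat characterisation of the event list
def pvEventsFlat (intervals : List (Int × Int)) : List (Int × Int) :=
  (intervals.filter (fun p => p.1 < p.2)).flatMap (fun p => [(p.1, 1), (p.2, -1)])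

theorem pvEventsOf_eq (intervals : List (Int × Int)) :
    pvEventsOf intervals = pvEventsFlat intervals := by
  have h : ∀ (l acc : List (Int × Int)),
      l.foldl (fun acc p => if p.1 < p.2 then acc ++ [(p.1, 1), (p.2, -1)] else acc) acc
        = acc ++ pvEventsFlat l := by
    intro l
    induction l with
    | nil => intro acc; simp [pvEventsFlat]
    | cons p rest ih =>
      intro acc
      by_cases hp : p.1 < p.2 <;> simp [pvEventsFlat, hp, List.foldl_cons, ih]
  simpa [pvEventsOf] using h intervals []

theorem pvEventsFlat_map_fst (intervals : List (Int × Int)) :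
    (pvEventsFlat intervals).map Prod.fst
      = (intervals.filter (fun p => p.1 < p.2)).flatMap (fun p => [p.1, p.2]) := by
  simp [pvEventsFlat, List.map_flatMap]

theorem pvInsertBy_pairwise {α : Type} (R : α → α → Prop) (before : α → α → Bool)
    (htrans : ∀ a b c, R a b → R b c → R a c)
    (htot : ∀ a b, if before a b then R a b else R b a)
    (x : α) (ys : List α) (h : ys.Pairwise R) :
    (PySem.List.insertBy before x ys).Pairwise R := by
  induction ys with
  | nil => simp [PySem.List.insertBy]
  | cons y ys ih =>
    rcases List.pairwise_cons.mp h with ⟨hy, hys⟩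
    have heq : PySem.List.insertBy before x (y :: ys)
        = if before x y = true then x :: y :: ys else y :: PySem.List.insertBy before x ys := rfl
    rw [heq]
    by_cases hb : before x y = true
    · rw [if_pos hb]
      have hxy : R x y := by have := htot x y; rwa [if_pos hb] at this
      refine List.pairwise_cons.mpr ⟨?_, h⟩
      intro z hz
      rcases List.mem_cons.mp hz with rfl | hz
      · exact hxy
      · exact htrans x y z hxy (hy z hz)
    · rw [if_neg hb]
      have hyx : R y x := by
        have := htot x y
        rw [if_neg hb] at this
        exact this
      refine List.pairwise_cons.mpr ⟨?_, ih hys⟩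
      intro z hz
      rcases (PySem.List.mem_insertBy before x z ys).mp hz with rfl | hz
      · exact hyx
      · exact hy z hz

theorem pvSorted2_pairwise_fst (evs : List (Int × Int)) :
    (PySem.List.sorted2 evs (fun e => e.1) (fun e => if e.2 = -1 then (0 : Int) else 1)).Pairwise
      (fun a b => a.1 ≤ b.1) := by
  have heq : PySem.List.sorted2 evs (fun e => e.1) (fun e => if e.2 = -1 then (0 : Int) else 1)
      = evs.foldl (fun acc x => PySem.List.insertBy
          (fun a b => decide (a.1 < b.1) ||
            (!decide (b.1 < a.1) && decide ((if a.2 = -1 then (0 : Int) else 1) < (if b.2 = -1 then (0 : Int) else 1)))) x acc) [] := rfl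
  rw [heq]
  have htot : ∀ a b : Int × Int,
      if (decide (a.1 < b.1) ||
          (!decide (b.1 < a.1) && decide ((if a.2 = -1 then (0 : Int) else 1) < (if b.2 = -1 then (0 : Int) else 1)))) = true
      then a.1 ≤ b.1 else b.1 ≤ a.1 := by
    intro a b
    by_cases h1 : a.1 < b.1
    · have hc : (decide (a.1 < b.1) ||
          (!decide (b.1 < a.1) && decide ((if a.2 = -1 then (0 : Int) else 1) < (if b.2 = -1 then (0 : Int) else 1)))) = true := by
        simp [h1]
      rw [if_pos hc]
      omega
    · by_cases h2 : b.1 < a.1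
      · have hc : (decide (a.1 < b.1) ||
            (!decide (b.1 < a.1) && decide ((if a.2 = -1 then (0 : Int) else 1) < (if b.2 = -1 then (0 : Int) else 1)))) = false := by
          simp [h1, h2]
        rw [if_neg (by simp [hc])]
        omega
      · by_cases hcond : (decide (a.1 < b.1) ||
            (!decide (b.1 < a.1) && decide ((if a.2 = -1 then (0 : Int) else 1) < (if b.2 = -1 then (0 : Int) else 1)))) = true
        · rw [if_pos hcond]; omega
        · rw [if_neg hcond]; omega
  have hstep : ∀ (l acc : List (Int × Int)),
      acc.Pairwise (fun a b : Int × Int => a.1 ≤ b.1) →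
      (l.foldl (fun acc x => PySem.List.insertBy
          (fun a b => decide (a.1 < b.1) ||
            (!decide (b.1 < a.1) && decide ((if a.2 = -1 then (0 : Int) else 1) < (if b.2 = -1 then (0 : Int) else 1)))) x acc) acc).Pairwise
        (fun a b : Int × Int => a.1 ≤ b.1) := by
    intro l
    induction l with
    | nil => intro acc hacc; simpa using hacc
    | cons e restl ihl =>
      intro acc hacc
      simp only [List.foldl_cons]
      exact ihl _ (pvInsertBy_pairwise (fun a b : Int × Int => a.1 ≤ b.1) _
        (fun a b c hab hbc => le_trans hab hbc) htot e acc hacc)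
  exact hstep evs [] List.Pairwise.nil

theorem pvConsume_eq (x : Int) (evs : List (Int × Int)) (cur : Int)
    (hsort : evs.Pairwise (fun a b => a.1 ≤ b.1))
    (hge : ∀ e ∈ evs, x ≤ e.1) :
    pvConsume x evs cur = (cur + pvSumAt x evs, evs.filter (fun e => ¬ e.1 = x)) := by
  induction evs generalizing cur with
  | nil => simp [pvConsume, pvSumAt]
  | cons e rest ih =>
    obtain ⟨c, d⟩ := e
    rcases List.pairwise_cons.mp hsort with ⟨hc, hrest⟩
    by_cases hcx : c = x
    · subst hcx
      have := ih hrest (fun e he => hge e (List.mem_cons_of_mem _ he)) (cur := cur + d)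
      simp only [pvConsume, this, pvSumAt, List.filter_cons]
      simp [add_assoc]
    · have hxc : x < c := lt_of_le_of_ne (hge (c, d) List.mem_cons_self) (fun h => hcx h.symm)
      have hnone : rest.filter (fun e => decide (e.1 = x)) = [] := by
        rw [List.filter_eq_nil_iff]
        intro e he
        have hce : c ≤ e.1 := by simpa using hc e he
        simp only [decide_eq_true_eq]
        omega
      have hall : rest.filter (fun e => !decide (e.1 = x)) = rest := by
        rw [List.filter_eq_self]
        intro e he
        have hce : c ≤ e.1 := by simpa using hc e he
        simp only [Bool.not_eq_eq_eq_not, Bool.not_true, decide_eq_false_iff_not]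
        omega
      simp [pvConsume, hcx, pvSumAt, hnone, hall]

-- splitting off the events at coordinate x from the prefix sum up to x'' (x ≤ x'')
theorem pvSumAtLE_split (x x'' : Int) (hle : x ≤ x'') (evs : List (Int × Int)) :
    pvSumAtLE x'' evs = pvSumAt x evs + pvSumAtLE x'' (evs.filter (fun e => ¬ e.1 = x)) := by
  induction evs with
  | nil => simp [pvSumAt, pvSumAtLE]
  | cons e rest ih =>
    obtain ⟨c, d⟩ := e
    by_cases hcx : c = x
    · subst hcx
      simp only [pvSumAt, pvSumAtLE, List.filter_cons, decide_not] at ih ⊢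
      simp [hle] at ih ⊢
      omega
    · simp only [pvSumAt, pvSumAtLE, List.filter_cons, decide_not] at ih ⊢
      by_cases hc2 : c ≤ x''
      · simp [hcx, hc2] at ih ⊢; omega
      · simp [hcx, hc2] at ih ⊢; omega

theorem pvSumAtLE_eq_head (x : Int) (evs : List (Int × Int))
    (hge : ∀ e ∈ evs, x ≤ e.1) :
    pvSumAtLE x evs = pvSumAt x evs := by
  unfold pvSumAtLE pvSumAt
  congr 2
  apply List.filter_congr
  intro e he
  have := hge e he
  simp only [decide_eq_decide]
  omega

-- the prefix sum of event deltas up to x equals the number of intervals containing x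
theorem pvSumAtLE_flat (intervals : List (Int × Int)) (x : Int) :
    pvSumAtLE x (pvEventsFlat intervals) = pvCov intervals x := by
  induction intervals with
  | nil => simp [pvEventsFlat, pvSumAtLE, pvCov]
  | cons p rest ih =>
    obtain ⟨a, b⟩ := p
    by_cases hp : a < b
    · have hflat : pvEventsFlat ((a, b) :: rest) = (a, 1) :: (b, -1) :: pvEventsFlat rest := by
        simp [pvEventsFlat, hp]
      rw [hflat]
      simp only [pvSumAtLE, List.filter_cons] at ih ⊢
      simp only [pvCov, List.countP_cons] at ih ⊢
      by_cases h1 : a ≤ x <;> by_cases h2 : b ≤ x <;>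
        simp [h1, h2] at ih ⊢ <;> omega
    · have hflat : pvEventsFlat ((a, b) :: rest) = pvEventsFlat rest := by
        simp [pvEventsFlat, hp]
      rw [hflat, ih]
      simp only [pvCov, List.countP_cons]
      have : (decide (a ≤ x) && decide (x < b)) = false := by
        simp only [Bool.and_eq_false_iff, decide_eq_false_iff_not]
        omega
      simp [this]

-- A's loop, run on strictly increasing xs containing all event coordinates with the
-- prefix-sum invariant, produces exactly the per-cell counts C
theorem pvLoopA_eq (C : Int → Int) :
    ∀ (xs : List Int) (evs : List (Int × Int)) (cur : Int),
      xs.Pairwise (· < ·) →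
      evs.Pairwise (fun a b => a.1 ≤ b.1) →
      (∀ e ∈ evs, e.1 ∈ xs) →
      (∀ x ∈ xs, cur + pvSumAtLE x evs = C x) →
      pvLoopA xs evs cur = (xs.zip xs.tail).map (fun q => (q.1, q.2, C q.1)) := by
  intro xs
  induction xs with
  | nil => intro evs cur _ _ _ _; simp [pvLoopA]
  | cons x xs ih =>
    intro evs cur hxs hsort hmem hkey
    cases xs with
    | nil => simp [pvLoopA]
    | cons y rest =>
      rcases List.pairwise_cons.mp hxs with ⟨hxlt, hxs'⟩
      have hge : ∀ e ∈ evs, x ≤ e.1 := by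
        intro e he
        rcases List.mem_cons.mp (hmem e he) with h | h
        · omega
        · have := hxlt e.1 h; omega
      have hxy : x < y := hxlt y List.mem_cons_self
      have hcons := pvConsume_eq x evs cur hsort hge
      have hcur : cur + pvSumAt x evs = C x := by
        rw [← pvSumAtLE_eq_head x evs hge]
        exact hkey x List.mem_cons_self
      have hA : pvLoopA (x :: y :: rest) evs cur
          = (x, y, C x) :: pvLoopA (y :: rest) (evs.filter (fun e => ¬ e.1 = x)) (C x) := by
        simp [pvLoopA, hcons, hxy, hcur]
      rw [hA]
      have hsort' := hsort.filter (fun e => decide (¬ e.1 = x))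
      have hmem' : ∀ e ∈ evs.filter (fun e => ¬ e.1 = x), e.1 ∈ y :: rest := by
        intro e he
        rw [List.mem_filter] at he
        rcases List.mem_cons.mp (hmem e he.1) with h | h
        · exfalso; revert he; simp [h]
        · exact h
      have hkey' : ∀ x'' ∈ y :: rest, C x + pvSumAtLE x'' (evs.filter (fun e => ¬ e.1 = x)) = C x'' := by
        intro x'' hx''
        have hxx'' : x < x'' := hxlt x'' hx''
        have := pvSumAtLE_split x x'' (by omega) evs
        have hk := hkey x'' (List.mem_cons_of_mem _ hx'')
        omega
      rw [ih _ _ hxs' hsort' hmem' hkey']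
      simp

-- ===== VERDICT (by name: the statement is the Claim_ definition above) =====
theorem coverage_cells_py_spec : Claim_equal_coverage_cells_py := by
  intro intervals _
  unfold Spec_coverage_cells_py
  by_cases hI : intervals = []
  · subst hI; rfl
  · have hE := pvEventsOf_eq intervals
    have hpts : PySem.List.sorted (PySem.Set.ofList ((pvEventsOf intervals).map Prod.fst)) (fun x => x)
        = PySem.List.sorted
            (PySem.Set.ofList ((intervals.filter (fun p => p.1 < p.2)).flatMap (fun p => [p.1, p.2])))
            (fun x => x) := by
      rw [hE, pvEventsFlat_map_fst]
    have hperm := PySem.List.sorted2_perm (pvEventsOf intervals)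
      (fun e => e.1) (fun e => if e.2 = -1 then (0 : Int) else 1) false
    simp only [coverage_cells_py, coverage_cells_py_alt, if_neg hI]
    rw [hpts, PySem.List.slice_from_one]
    rw [pvLoopA_eq (pvCov intervals) _ _ 0
      (by rw [← hpts]; exact PySem.List.sorted_ofList_pairwise_lt _)
      (pvSorted2_pairwise_fst _)
      (by
        intro e he
        have heE : e ∈ pvEventsOf intervals := hperm.mem_iff.mp he
        rw [← hpts, PySem.List.mem_sorted, PySem.Set.mem_ofList]
        exact List.mem_map_of_mem heE)
      (by
        intro x _
        have hfilt : pvSumAtLE x (PySem.List.sorted2 (pvEventsOf intervals)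
            (fun e => e.1) (fun e => if e.2 = -1 then (0 : Int) else 1))
            = pvSumAtLE x (pvEventsOf intervals) := by
          unfold pvSumAtLE
          exact ((hperm.filter _).map _).sum_eq
        rw [hfilt, hE, pvSumAtLE_flat]
        ring)]
    rfl
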